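-- pv_equiv track=rewrite | github.com/data-IA-2023/vocal_weather_north_scorers | text_recognition.py | localisation
-- ===== SOURCE A (Python) =====
-- def virgule(a):
--     b=""
--     a = a.lower().replace('\xa0', '')
--     for carac in a:
--         if carac==',' or carac== ';' or carac== '.' or carac== '?' or carac== '!':
--             b+=' , '
--         else:
--             b+=carac
--     return b
--
-- def underscore(a):
--     a=' '.join(a)
--     b=''
--     for carac in a:
--         if carac=='▁':
--             b+=''
--         else:
--             b+=carac
--     b=b.lower()
--     b=b.split(' ')
--     return b
--
-- def localisation(a,b):
--     a=a.lower()
--     a=virgule(a)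
--     a=a.split(' ')
--     b=underscore(b)
--     c=[]
--     for i in range(len(a)):
--         if a[i] in b:
--             if i!=0 and a[i-1] in b:
--                 c[-1]=c[-1]+' '+a[i]
--             else:
--                 c.append(a[i])
--     return c
-- ===== SOURCE B (Python) =====
-- def virgule(a):
--     b=""
--     a = a.lower().replace('\xa0', '')
--     for carac in a:
--         if carac==',' or carac== ';' or carac== '.' or carac== '?' or carac== '!':
--             b+=' , '
--         else:
--             b+=carac
--     return b
--
-- def underscore(a):
--     a=' '.join(a)
--     b=''
--     for carac in a:
--         if carac=='▁':
--             b+=''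
--         else:
--             b+=carac
--     b=b.lower()
--     b=b.split(' ')
--     return b
--
-- def localisation(a, b):
--     words = virgule(a.lower()).split(' ')
--     keys = underscore(b)
--     runs = []
--     current = []
--     for w in words:
--         if w in keys:
--             current.append(w)
--         elif current:
--             runs.append(current)
--             current = []
--     if current:
--         runs.append(current)
--     return [' '.join(r) for r in runs]
-- ===== Notes on version B (the rewrite author's own statement) =====
-- stated objective: simpler
-- what changed: A's indexed scan with i!=0 look-back, repeated membership re-test of a[i-1] and in-place c[-1] string mutation is replaced by a run-collector: accumulate the current run of matching words, flush it on a non-match, then join each run once at the end.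
import Mathlib
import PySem

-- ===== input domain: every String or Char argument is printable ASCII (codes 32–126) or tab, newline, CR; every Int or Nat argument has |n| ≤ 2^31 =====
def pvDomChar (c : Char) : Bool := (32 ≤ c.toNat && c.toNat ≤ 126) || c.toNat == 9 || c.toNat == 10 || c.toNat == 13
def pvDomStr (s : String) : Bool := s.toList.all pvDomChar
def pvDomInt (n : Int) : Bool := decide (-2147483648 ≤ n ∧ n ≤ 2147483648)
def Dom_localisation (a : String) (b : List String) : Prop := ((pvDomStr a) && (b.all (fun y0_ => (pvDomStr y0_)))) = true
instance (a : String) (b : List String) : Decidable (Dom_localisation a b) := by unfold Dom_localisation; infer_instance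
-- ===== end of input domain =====

-- B replaces A's indexed scan with look-back and c[-1] mutation by a plainer decomposition:
-- collect maximal runs of matching words, then join each run ('simpler'; same cost).

-- ===== PORT A =====
-- helper virgule (identical source text in A and B): lower, drop '\xa0', pad punctuation with ' , '
def pvVirgule (a : List Char) : List Char :=
  (PySem.Chars.replace (PySem.Chars.lower a) ['\xa0'] []).foldl (fun b carac =>
    if carac = ',' ∨ carac = ';' ∨ carac = '.' ∨ carac = '?' ∨ carac = '!'
    then b ++ [' ', ',', ' '] else b ++ [carac]) []

-- helper underscore (identical source text in A and B): join with ' ', drop '▁', lower, split on ' '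
def pvUnderscore (b : List String) : List (List Char) :=
  PySem.Chars.splitOn
    (PySem.Chars.lower
      ((PySem.Chars.join [' '] (b.map String.toList)).foldl
        (fun acc carac => if carac = '▁' then acc else acc ++ [carac]) ([] : List Char)))
    [' ']

-- A's loop body for index i (a[i] and a[i-1] are in range whenever Python reads them,
-- so List.getD is exact; c[-1]=… is exact because that branch implies c ≠ [])
def pvStepA (aw bw : List (List Char)) (c : List (List Char)) (i : Nat) : List (List Char) :=
  let w := aw.getD i []
  if w ∈ bw then
    if i ≠ 0 ∧ aw.getD (i - 1) [] ∈ bw then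
      c.dropLast ++ [c.getLastD [] ++ ' ' :: w]
    else c ++ [w]
  else c

-- A's 'for i in range(len(a))' loop
def pvLoopA (aw bw : List (List Char)) : List (List Char) :=
  (List.range aw.length).foldl (pvStepA aw bw) []

def localisation (a : String) (b : List String) : List String :=
  (pvLoopA (PySem.Chars.splitOn (pvVirgule (PySem.Chars.lower a.toList)) [' '])
    (pvUnderscore b)).map String.ofList

-- ===== PORT B =====
-- B's loop body: accumulate the current run of matching words; flush it when a non-match ends it
def pvStepB (bw : List (List Char)) (s : List (List (List Char)) × List (List Char))
    (w : List Char) : List (List (List Char)) × List (List Char) :=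
  if w ∈ bw then (s.1, s.2 ++ [w])
  else if s.2 ≠ [] then (s.1 ++ [s.2], []) else s

-- B's trailing 'if current: runs.append(current)'
def pvFlush (s : List (List (List Char)) × List (List Char)) : List (List (List Char)) :=
  if s.2 ≠ [] then s.1 ++ [s.2] else s.1

-- B's loop over the words, then "[' '.join(r) for r in runs]"
def pvLoopB (aw bw : List (List Char)) : List (List Char) :=
  (pvFlush (aw.foldl (pvStepB bw) ([], []))).map (PySem.Chars.join [' '])

def localisation_alt (a : String) (b : List String) : List String :=
  (pvLoopB (PySem.Chars.splitOn (pvVirgule (PySem.Chars.lower a.toList)) [' '])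
    (pvUnderscore b)).map String.ofList

-- ===== PRECONDITION & SPEC =====
def Spec_localisation (a : String) (b : List String) (out : List String) : Prop := out = localisation_alt a b
instance (a : String) (b : List String) (out : List String) : Decidable (Spec_localisation a b out) := by unfold Spec_localisation; infer_instance

-- ===== CLAIM (what is proved, stated in full; the proofs are below) =====
def Claim_equal_localisation : Prop := ∀ (a : String) (b : List String), Dom_localisation a b → Spec_localisation a b (localisation a b)

-- ===== LEMMAS AND PROOFS =====

lemma pv_join_append_singleton (cur : List (List Char)) (w : List Char) (h : cur ≠ []) :
    PySem.Chars.join [' '] (cur ++ [w]) = PySem.Chars.join [' '] cur ++ ' ' :: w := by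
  induction cur with
  | nil => simp at h
  | cons x t ih =>
    cases t with
    | nil => simp [PySem.Chars.join_singleton, PySem.Chars.join_cons_cons]
    | cons y u =>
      rw [List.cons_append, List.cons_append, PySem.Chars.join_cons_cons,
        ← List.cons_append, ih (by simp), PySem.Chars.join_cons_cons]
      simp

-- the invariant: A's accumulator after the first n indices is B's runs-so-far (joined),
-- plus the still-open run; the open run is nonempty iff word n-1 exists and matches
lemma pv_loop_invariant (aw bw : List (List Char)) (n : Nat) (hn : n ≤ aw.length) :
    ((List.range n).foldl (pvStepA aw bw) [] =
      ((aw.take n).foldl (pvStepB bw) ([], [])).1.map (PySem.Chars.join [' ']) ++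
        (if ((aw.take n).foldl (pvStepB bw) ([], [])).2 = [] then []
         else [PySem.Chars.join [' '] ((aw.take n).foldl (pvStepB bw) ([], [])).2]))
    ∧ (((aw.take n).foldl (pvStepB bw) ([], [])).2 ≠ [] ↔ (n ≠ 0 ∧ aw.getD (n - 1) [] ∈ bw)) := by
  induction n with
  | zero => simp
  | succ m ih =>
    have hm : m ≤ aw.length := Nat.le_of_succ_le hn
    have hlt : m < aw.length := hn
    obtain ⟨ih1, ih2⟩ := ih hm
    have htake : aw.take (m + 1) = aw.take m ++ [aw.getD m []] := by
      rw [List.take_add_one, List.getElem?_eq_getElem hlt, List.getD_eq_getElem aw [] hlt]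
      simp
    rw [List.range_succ, List.foldl_append, List.foldl_cons, List.foldl_nil, ih1,
      htake, List.foldl_append, List.foldl_cons, List.foldl_nil]
    set s := (aw.take m).foldl (pvStepB bw) ([], []) with hs
    set w := aw.getD m [] with hw
    by_cases hwb : w ∈ bw
    · -- word m matches: A appends or extends c[-1]; B extends the open run
      simp only [pvStepA, pvStepB, ← hw]
      rw [if_pos hwb, if_pos hwb]
      by_cases hprev : m ≠ 0 ∧ aw.getD (m - 1) [] ∈ bw
      · have hcur : s.2 ≠ [] := ih2.mpr hprev
        rw [if_pos hprev]
        constructor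
        · rw [if_neg hcur, if_neg (show ¬(s.2 ++ [w] = []) by simp)]
          rw [List.dropLast_concat, List.getLastD_concat, pv_join_append_singleton s.2 w hcur]
        · constructor
          · intro _
            exact ⟨Nat.succ_ne_zero m, by rw [Nat.add_sub_cancel, ← hw]; exact hwb⟩
          · intro _; simp
      · have hcur : s.2 = [] := by by_contra hne; exact hprev (ih2.mp hne)
        rw [if_neg hprev]
        constructor
        · rw [hcur]; simp [PySem.Chars.join_singleton]
        · constructor
          · intro _
            exact ⟨Nat.succ_ne_zero m, by rw [Nat.add_sub_cancel, ← hw]; exact hwb⟩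
          · intro _; simp
    · -- word m does not match: A leaves c alone; B flushes the open run
      simp only [pvStepA, pvStepB, ← hw]
      rw [if_neg hwb, if_neg hwb]
      by_cases hcur : s.2 = []
      · rw [if_neg (not_not_intro hcur)]
        constructor
        · simp [hcur]
        · constructor
          · intro h; exact absurd hcur h
          · intro h
            have h2 := h.2
            rw [Nat.add_sub_cancel, ← hw] at h2
            exact absurd h2 hwb
      · rw [if_pos hcur]
        constructor
        · simp [hcur]
        · constructor
          · intro h; simp at h
          · intro h
            have h2 := h.2
            rw [Nat.add_sub_cancel, ← hw] at h2
            exact absurd h2 hwb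

lemma pv_loop_eq (aw bw : List (List Char)) : pvLoopA aw bw = pvLoopB aw bw := by
  obtain ⟨h1, -⟩ := pv_loop_invariant aw bw aw.length le_rfl
  rw [List.take_length] at h1
  unfold pvLoopA pvLoopB pvFlush
  rw [h1]
  by_cases hcur : (aw.foldl (pvStepB bw) ([], [])).2 = [] <;> simp [hcur]

-- ===== VERDICT (by name: the statement is the Claim_ definition above) =====
theorem localisation_spec : Claim_equal_localisation := by
  intro a b _
  unfold Spec_localisation localisation localisation_alt
  rw [pv_loop_eq]
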